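-- pv_equiv track=rewrite | github.com/jeneves/Heuristics | project/findLargestCostFreeS.py | find_most_conflicts
-- ===== SOURCE A (Python) =====
-- def find_most_conflicts(s, interference_matrix=[[2, 1, 0, 0, 0, 0, 0],
--                                                 [1, 2, 1, 1, 1, 0, 0],
--                                                 [0, 1, 2, 0, 1, 0, 0],
--                                                 [0, 1, 0, 2, 1, 1, 0],
--                                                 [0, 1, 1, 1, 2, 1, 1],
--                                                 [0, 0, 0, 1, 1, 2, 1],
--                                                 [0, 0, 0, 0, 1, 1, 2]]):
--
--     num_cells = len(interference_matrix)
--     num_channels = len(s[0])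
--
--     costs = []
--     for i in range(7):
--         costs.append([0] * 50)
--
--     for cell in range(0, num_cells):
--         for check_cell in range(cell, num_cells):
--             distance = interference_matrix[cell][check_cell]
--
--             # Perform checks when values need to be apart
--             if distance > 0:
--                 # Only care about separation, so subtract 1 for check range
--                 distance -= 1
--                 for channel in range(0, num_channels):
--
--                     # See if there's something to check
--                     value = get_value(s, cell, channel)
--                     if value == 1:
--
--                         min_check = 0
--                         max_check = min(channel + distance + 1, num_channels)
--
--                         # Check subsequent channels on same cell
--                         if cell == check_cell:
--                             min_check = channel + 1
--                         # Check below right/left channels on different cell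
--                         else:
--                             min_check = max(channel - distance, 0)
--
--                         # Actually perform the check
--                         for check_channel in range(min_check, max_check):
--                             if get_value(s, check_cell, check_channel) == 1:
--                                 costs[cell][channel] += 1
--                                 costs[check_cell][check_channel] += 1
--
--     high_cost = 0
--     high_cell = 0
--     high_channel = 0
--
--     for cell in range(7):
--         for channel in range(50):
--             if (costs[cell][channel] > high_cost):
--                 high_cost = costs[cell][channel]
--                 high_cell = cell
--                 high_channel = channel
--
--     return (high_cell, high_channel)
--
-- def get_value(s, cell, channel):
--     return s[cell][channel]
-- ===== SOURCE B (Python) =====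
-- def find_most_conflicts(s, interference_matrix=[[2, 1, 0, 0, 0, 0, 0],
--                                                 [1, 2, 1, 1, 1, 0, 0],
--                                                 [0, 1, 2, 0, 1, 0, 0],
--                                                 [0, 1, 0, 2, 1, 1, 0],
--                                                 [0, 1, 1, 1, 2, 1, 1],
--                                                 [0, 0, 0, 1, 1, 2, 1],
--                                                 [0, 0, 0, 0, 1, 1, 2]]):
--     num_cells = len(interference_matrix)
--     num_channels = len(s[0])
--
--     # Occupied channels of each cell, indexed once.
--     ones = [[p for p in range(num_channels) if s[c][p] == 1]
--             for c in range(num_cells)]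
--
--     # Closed-form conflict count of one assignment (c0, ch0): for every cell c1
--     # with a positive required separation D to c0, count the occupied channels
--     # of c1 within distance D-1 of ch0 (excluding ch0 itself when c1 == c0).
--     def cost(c0, ch0):
--         if s[c0][ch0] != 1:
--             return 0
--         total = 0
--         for c1 in range(num_cells):
--             D = interference_matrix[min(c0, c1)][max(c0, c1)]
--             if D > 0:
--                 d = D - 1
--                 if c1 == c0:
--                     total += sum(1 for x in ones[c1]
--                                  if x != ch0 and abs(x - ch0) <= d)
--                 else:
--                     total += sum(1 for x in ones[c1] if abs(x - ch0) <= d)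
--         return total
--
--     best_cost, best = 0, (0, 0)
--     for c in range(num_cells):
--         for ch in range(num_channels):
--             v = cost(c, ch)
--             if v > best_cost:
--                 best_cost, best = v, (c, ch)
--     return best
-- ===== Notes on version B (the rewrite author's own statement) =====
-- stated objective: alternative
-- what changed: B replaces A's mutable 7x50 cost table filled by double increments over interfering pairs with a closed-form per-assignment count (for each occupied (cell,channel), count occupied channels of each interfering cell within separation distance), and takes the first-max directly over that function on the num_cells x num_channels grid instead of scanning the fixed 7x50 table.
import Mathlib
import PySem

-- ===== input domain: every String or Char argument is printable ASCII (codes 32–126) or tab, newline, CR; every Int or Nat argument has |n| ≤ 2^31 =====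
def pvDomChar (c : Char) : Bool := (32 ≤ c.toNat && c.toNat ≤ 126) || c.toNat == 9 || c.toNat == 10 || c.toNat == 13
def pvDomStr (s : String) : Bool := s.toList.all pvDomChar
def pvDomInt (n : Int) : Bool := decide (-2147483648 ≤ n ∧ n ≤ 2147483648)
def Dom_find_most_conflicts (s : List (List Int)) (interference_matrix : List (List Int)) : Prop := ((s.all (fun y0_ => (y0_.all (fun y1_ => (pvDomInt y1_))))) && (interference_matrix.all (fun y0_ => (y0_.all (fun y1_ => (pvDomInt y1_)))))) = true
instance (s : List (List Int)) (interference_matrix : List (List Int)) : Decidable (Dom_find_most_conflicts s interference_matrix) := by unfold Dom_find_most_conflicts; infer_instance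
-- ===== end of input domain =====

-- B replaces A's mutable cost table, filled by double increments over interfering
-- pairs, with a closed-form per-assignment conflict count and a direct first-max
-- scan over the num_cells × num_channels grid (objective: alternative algorithm).

-- ===== PORT A =====
-- get_value(s, cell, channel) = s[cell][channel]; pyGetD is exact here because
-- Pre_ puts every index this port uses in range (Python raises outside Pre_).
def pvGetVal (s : List (List Int)) (i j : Int) : Int :=
  PySem.List.pyGetD (PySem.List.pyGetD s i []) j 0

-- costs[i][j] += 1; exact for the nonnegative in-range indices Pre_ guarantees
-- (Python raises IndexError outside Pre_).
def pvBump (m : List (List Int)) (i j : Int) : List (List Int) :=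
  m.modify i.toNat (fun r => r.modify j.toNat (· + 1))

-- the two nested loops of A that fill `costs`
def pvCostsA (s : List (List Int)) (interference_matrix : List (List Int)) : List (List Int) :=
  let num_cells : Int := interference_matrix.length
  let num_channels : Int := (PySem.List.pyGetD s 0 []).length
  (PySem.List.pyRange 0 num_cells 1).foldl (fun cs cell =>
    (PySem.List.pyRange cell num_cells 1).foldl (fun cs check_cell =>
      let distance := pvGetVal interference_matrix cell check_cell
      if distance > 0 then
        let d := distance - 1
        (PySem.List.pyRange 0 num_channels 1).foldl (fun cs channel =>
          if pvGetVal s cell channel == 1 then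
            let max_check := min (channel + d + 1) num_channels
            let min_check := if cell == check_cell then channel + 1 else max (channel - d) 0
            (PySem.List.pyRange min_check max_check 1).foldl (fun cs check_channel =>
              if pvGetVal s check_cell check_channel == 1 then
                pvBump (pvBump cs cell channel) check_cell check_channel
              else cs) cs
          else cs) cs
      else cs) cs)
    (List.replicate 7 (List.replicate 50 (0 : Int)))

-- A's final 7×50 index scan for the first strict maximum
def pvScanA (costs : List (List Int)) : Int × Int :=
  let fin := (PySem.List.pyRange 0 7 1).foldl (fun st cell =>
    (PySem.List.pyRange 0 50 1).foldl (fun (st : Int × Int × Int) channel =>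
      if pvGetVal costs cell channel > st.1 then (pvGetVal costs cell channel, cell, channel)
      else st) st) (0, 0, 0)
  (fin.2.1, fin.2.2)

def find_most_conflicts (s : List (List Int)) (interference_matrix : List (List Int)) : Int × Int :=
  pvScanA (pvCostsA s interference_matrix)

-- ===== PORT B =====
-- ones = [[p for p in range(num_channels) if s[c][p] == 1] for c in range(num_cells)]
def pvOnes (s : List (List Int)) (num_cells num_channels : Int) : List (List Int) :=
  (PySem.List.pyRange 0 num_cells 1).map (fun c =>
    (PySem.List.pyRange 0 num_channels 1).filter (fun p => pvGetVal s c p == 1))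

-- B's closed-form cost of assignment (c0, ch0); the inner sum-of-indicators is
-- ported as List.countP
def pvCostB (s interference_matrix ones : List (List Int)) (num_cells : Int)
    (c0 ch0 : Int) : Int :=
  if pvGetVal s c0 ch0 ≠ 1 then 0
  else
    (PySem.List.pyRange 0 num_cells 1).foldl (fun total c1 =>
      let D := pvGetVal interference_matrix (min c0 c1) (max c0 c1)
      if D > 0 then
        if c1 == c0 then
          total + ((PySem.List.pyGetD ones c1 []).countP
            (fun x => decide (x ≠ ch0 ∧ |x - ch0| ≤ D - 1)) : Int)
        else
          total + ((PySem.List.pyGetD ones c1 []).countP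
            (fun x => decide (|x - ch0| ≤ D - 1)) : Int)
      else total) 0

def find_most_conflicts_alt (s : List (List Int)) (interference_matrix : List (List Int)) : Int × Int :=
  let num_cells : Int := interference_matrix.length
  let num_channels : Int := (PySem.List.pyGetD s 0 []).length
  let ones := pvOnes s num_cells num_channels
  let fin := (PySem.List.pyRange 0 num_cells 1).foldl (fun st c =>
    (PySem.List.pyRange 0 num_channels 1).foldl (fun (st : Int × Int × Int) ch =>
      let v := pvCostB s interference_matrix ones num_cells c ch
      if v > st.1 then (v, c, ch) else st) st) (0, 0, 0)
  (fin.2.1, fin.2.2)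

-- ===== PRECONDITION & SPEC =====
-- Pre_ = exactly the inputs where Python A returns: s nonempty, the first
-- num_cells rows of s at least num_channels (= len(s[0])) long, every row of the
-- interference matrix at least num_cells long, and — since A writes into a fixed
-- 7×50 costs table — at most 7 cells and at most 50 channels.
def Pre_find_most_conflicts (s : List (List Int)) (interference_matrix : List (List Int)) : Prop :=
  s ≠ [] ∧
  interference_matrix.length ≤ s.length ∧
  interference_matrix.length ≤ 7 ∧
  (s.headD []).length ≤ 50 ∧
  (∀ r ∈ interference_matrix, interference_matrix.length ≤ r.length) ∧
  (∀ r ∈ s.take interference_matrix.length, (s.headD []).length ≤ r.length)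
instance (s : List (List Int)) (interference_matrix : List (List Int)) : Decidable (Pre_find_most_conflicts s interference_matrix) := by unfold Pre_find_most_conflicts; infer_instance

def pvWitness_find_most_conflicts : List (List Int) × List (List Int) :=
  ([[1, 1, 0], [0, 1, 1]], [[2, 1], [1, 2]])

def Spec_find_most_conflicts (s : List (List Int)) (interference_matrix : List (List Int)) (out : Int × Int) : Prop := out = find_most_conflicts_alt s interference_matrix
instance (s : List (List Int)) (interference_matrix : List (List Int)) (out : Int × Int) : Decidable (Spec_find_most_conflicts s interference_matrix out) := by unfold Spec_find_most_conflicts; infer_instance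

-- ===== CLAIM (what is proved, stated in full; the proofs are below) =====
def Claim_equal_find_most_conflicts : Prop := ∀ (s : List (List Int)) (interference_matrix : List (List Int)), Dom_find_most_conflicts s interference_matrix → Pre_find_most_conflicts s interference_matrix → Spec_find_most_conflicts s interference_matrix (find_most_conflicts s interference_matrix)

-- ===== LEMMAS AND PROOFS =====

-- abbreviations used only by the proofs
def pvN (s : List (List Int)) : Int := (PySem.List.pyGetD s 0 []).length
def pvNC (im : List (List Int)) : Int := im.length
def pvInit : List (List Int) := List.replicate 7 (List.replicate 50 (0 : Int))

-- apply a list of increment events to the table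
def pvApply (evs : List (Int × Int)) (m : List (List Int)) : List (List Int) :=
  evs.foldl (fun m e => pvBump m e.1 e.2) m

def pvLo (cell cc p d : Int) : Int := if cell == cc then p + 1 else max (p - d) 0

-- the increment events A generates for one occupied channel p of `cell` against `cc`
def pvEvQ (s : List (List Int)) (cell cc p d n : Int) : List (Int × Int) :=
  (PySem.List.pyRange (pvLo cell cc p d) (min (p + d + 1) n) 1).flatMap (fun q =>
    if pvGetVal s cc q == 1 then [(cell, p), (cc, q)] else [])

-- the increment events for one interfering pair (cell, cc)
def pvEv (s im : List (List Int)) (cell cc : Int) : List (Int × Int) :=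
  if pvGetVal im cell cc > 0 then
    (PySem.List.pyRange 0 (pvN s) 1).flatMap (fun p =>
      if pvGetVal s cell p == 1 then
        pvEvQ s cell cc p (pvGetVal im cell cc - 1) (pvN s)
      else [])
  else []

def pvEvents (s im : List (List Int)) : List (Int × Int) :=
  (PySem.List.pyRange 0 (pvNC im) 1).flatMap (fun cell =>
    (PySem.List.pyRange cell (pvNC im) 1).flatMap (fun cc => pvEv s im cell cc))

def pvEntry (m : List (List Int)) (a b : Nat) : Int := (m.getD a []).getD b 0

def pvPr (tc tch : Int) : Int × Int → Bool := fun e => decide (e.1 = tc ∧ e.2 = tch)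

def pvShape (m : List (List Int)) : Prop :=
  m.length = 7 ∧ ∀ (k : Nat) (h : k < m.length), m[k].length = 50

def pvOnesRow (s : List (List Int)) (n c : Int) : List Int :=
  (PySem.List.pyRange 0 n 1).filter (fun p => pvGetVal s c p == 1)

-- generic fold lemmas
theorem pvFoldl_pres {α β : Type} (P : β → Prop) (f : β → α → β) (l : List α) (init : β)
    (hf : ∀ acc x, P acc → P (f acc x)) (h0 : P init) : P (l.foldl f init) := by
  induction l generalizing init with
  | nil => exact h0
  | cons x t ih => exact ih _ (hf _ _ h0)

theorem pvFoldl_fix {α β : Type} (P : β → Prop) (f : β → α → β) (l : List α) (st : β)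
    (hst : P st) (h : ∀ st x, x ∈ l → P st → f st x = st) : l.foldl f st = st := by
  induction l generalizing st with
  | nil => rfl
  | cons x t ih =>
      rw [List.foldl_cons, h st x (List.mem_cons_self) hst]
      exact ih st hst (fun st y hy => h st y (List.mem_cons_of_mem _ hy))

theorem pvApply_append (a b : List (Int × Int)) (m : List (List Int)) :
    pvApply (a ++ b) m = pvApply b (pvApply a m) := by
  simp [pvApply, List.foldl_append]

theorem pvApply_flatMap {α : Type} (l : List α) (g : α → List (Int × Int)) (m : List (List Int)) :
    l.foldl (fun m x => pvApply (g x) m) m = pvApply (l.flatMap g) m := by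
  induction l generalizing m with
  | nil => rfl
  | cons x t ih => rw [List.foldl_cons, List.flatMap_cons, pvApply_append, ih]

theorem pvCountP_flatMap {α β : Type} (l : List α) (g : α → List β) (pr : β → Bool) :
    (l.flatMap g).countP pr = (l.map (fun x => (g x).countP pr)).sum := by
  induction l with
  | nil => rfl
  | cons x t ih => rw [List.flatMap_cons, List.countP_append, List.map_cons, List.sum_cons, ih]

theorem pvSum_point (a b x : Int) (f : Int → Nat)
    (h0 : ∀ y, a ≤ y → y < b → y ≠ x → f y = 0) :
    ((PySem.List.pyRange a b 1).map f).sum = if a ≤ x ∧ x < b then f x else 0 := by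
  by_cases hx : a ≤ x ∧ x < b
  · rw [if_pos hx]
    rw [PySem.List.pyRange_one_append a x b hx.1 (by omega),
        PySem.List.pyRange_one_cons (show x < b by omega)]
    rw [List.map_append, List.map_cons, List.sum_append, List.sum_cons]
    have z1 : ((PySem.List.pyRange a x 1).map f).sum = 0 := by
      apply List.sum_eq_zero
      intro y hy
      obtain ⟨u, hu, rfl⟩ := List.mem_map.mp hy
      rw [PySem.List.mem_pyRange_one] at hu
      exact h0 u (by omega) (by omega) (by omega)
    have z2 : ((PySem.List.pyRange (x+1) b 1).map f).sum = 0 := by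
      apply List.sum_eq_zero
      intro y hy
      obtain ⟨u, hu, rfl⟩ := List.mem_map.mp hy
      rw [PySem.List.mem_pyRange_one] at hu
      exact h0 u (by omega) (by omega) (by omega)
    rw [z1, z2]
    omega
  · rw [if_neg hx]
    apply List.sum_eq_zero
    intro y hy
    obtain ⟨u, hu, rfl⟩ := List.mem_map.mp hy
    rw [PySem.List.mem_pyRange_one] at hu
    exact h0 u (by omega) (by omega) (by omega)

theorem pvCountP_split {α : Type} (l : List α) (p q r : α → Bool)
    (h : ∀ x ∈ l, (p x = (q x || r x)) ∧ ¬(q x = true ∧ r x = true)) :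
    l.countP p = l.countP q + l.countP r := by
  induction l with
  | nil => rfl
  | cons x t ih =>
      rw [List.countP_cons, List.countP_cons, List.countP_cons,
        ih (fun y hy => h y (List.mem_cons_of_mem _ hy))]
      obtain ⟨he, hd⟩ := h x (List.mem_cons_self)
      cases hq : q x <;> cases hr : r x <;>
        simp [hq, hr] at he hd ⊢ <;> simp [he] <;> omega

-- range(lo, hi) is the sub-range of range(0, n) cut out by lo ≤ q < hi
theorem pvRange_filter (lo hi n : Int) (h0 : 0 ≤ lo) (h1 : hi ≤ n) :
    PySem.List.pyRange lo hi 1 =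
      (PySem.List.pyRange 0 n 1).filter (fun q => decide (lo ≤ q ∧ q < hi)) := by
  by_cases hle : hi ≤ lo
  · rw [PySem.List.pyRange_one_eq_nil hle]
    symm
    rw [List.filter_eq_nil_iff]
    intro q hq
    simp only [decide_eq_true_eq]
    omega
  · have hlt : lo < hi := by omega
    have e1 : PySem.List.pyRange 0 n 1 =
        PySem.List.pyRange 0 lo 1 ++ (PySem.List.pyRange lo hi 1 ++ PySem.List.pyRange hi n 1) := by
      rw [← PySem.List.pyRange_one_append lo hi n (le_of_lt hlt) h1,
          ← PySem.List.pyRange_one_append 0 lo n h0 (by omega)]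
    rw [e1, List.filter_append, List.filter_append]
    have f1 : (PySem.List.pyRange 0 lo 1).filter (fun q => decide (lo ≤ q ∧ q < hi)) = [] := by
      rw [List.filter_eq_nil_iff]; intro q hq
      rw [PySem.List.mem_pyRange_one] at hq
      simp only [decide_eq_true_eq]; omega
    have f3 : (PySem.List.pyRange hi n 1).filter (fun q => decide (lo ≤ q ∧ q < hi)) = [] := by
      rw [List.filter_eq_nil_iff]; intro q hq
      rw [PySem.List.mem_pyRange_one] at hq
      simp only [decide_eq_true_eq]; omega
    have f2 : (PySem.List.pyRange lo hi 1).filter (fun q => decide (lo ≤ q ∧ q < hi)) =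
        PySem.List.pyRange lo hi 1 := by
      rw [List.filter_eq_self]; intro q hq
      rw [PySem.List.mem_pyRange_one] at hq
      simp only [decide_eq_true_eq]; omega
    rw [f1, f2, f3, List.nil_append, List.append_nil]

-- A's nested fold is the application of the event list
theorem pvCostsA_events (s im : List (List Int)) :
    pvCostsA s im = pvApply (pvEvents s im) pvInit := by
  simp only [pvCostsA, pvEvents, pvN, pvNC]
  rw [← pvApply_flatMap]
  apply PySem.List.foldl_congr_mem
  intro cs cell hcell
  rw [← pvApply_flatMap]
  apply PySem.List.foldl_congr_mem
  intro cs2 cc hcc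
  dsimp only
  unfold pvEv
  by_cases hD : pvGetVal im cell cc > 0
  · rw [if_pos hD, if_pos hD, ← pvApply_flatMap]
    apply PySem.List.foldl_congr_mem
    intro cs3 p hp
    by_cases hs1 : pvGetVal s cell p == 1
    · rw [if_pos hs1, if_pos hs1]
      unfold pvEvQ pvLo
      rw [← pvApply_flatMap]
      apply PySem.List.foldl_congr_mem
      intro cs4 q hq
      by_cases hs2 : pvGetVal s cc q == 1
      · rw [if_pos hs2, if_pos hs2]; rfl
      · rw [if_neg hs2, if_neg hs2]; rfl
    · rw [if_neg hs1, if_neg hs1]; rfl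
  · rw [if_neg hD, if_neg hD]; rfl

-- membership facts about one event block
theorem pvMem_pvEvQ {s : List (List Int)} {cell cc p d n : Int} {e : Int × Int}
    (h : e ∈ pvEvQ s cell cc p d n) :
    e = (cell, p) ∨ (e.1 = cc ∧ pvLo cell cc p d ≤ e.2 ∧ e.2 < min (p + d + 1) n ∧
      pvGetVal s cc e.2 = 1) := by
  unfold pvEvQ at h
  rw [List.mem_flatMap] at h
  obtain ⟨q, hq, h2⟩ := h
  rw [PySem.List.mem_pyRange_one] at hq
  by_cases hs : pvGetVal s cc q == 1
  · rw [if_pos hs] at h2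
    rw [List.mem_cons] at h2
    rcases h2 with h2 | h2
    · exact Or.inl h2
    · rw [List.mem_singleton] at h2
      subst h2
      exact Or.inr ⟨rfl, by simpa using hq.1, by simpa using hq.2, by simpa using hs⟩
  · rw [if_neg hs] at h2
    exact absurd h2 (List.not_mem_nil)

theorem pvMem_pvEv {s im : List (List Int)} {cell cc : Int} {e : Int × Int}
    (h : e ∈ pvEv s im cell cc) (hcell : 0 ≤ cell) :
    (e.1 = cell ∨ e.1 = cc) ∧ 0 ≤ e.2 ∧ e.2 < pvN s ∧ pvGetVal s e.1 e.2 = 1 := by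
  unfold pvEv at h
  split at h
  case isFalse => exact absurd h (List.not_mem_nil)
  case isTrue hD =>
    rw [List.mem_flatMap] at h
    obtain ⟨p, hp, h2⟩ := h
    rw [PySem.List.mem_pyRange_one] at hp
    split at h2
    case isFalse => exact absurd h2 (List.not_mem_nil)
    case isTrue hsp =>
      rcases pvMem_pvEvQ h2 with h3 | h3
      · subst h3
        exact ⟨Or.inl rfl, hp.1, hp.2, by simpa using hsp⟩
      · obtain ⟨h4, h5, h6, h7⟩ := h3
        refine ⟨Or.inr h4, ?_, by omega, by rw [h4]; exact h7⟩
        have : 0 ≤ pvLo cell cc p (pvGetVal im cell cc - 1) := by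
          unfold pvLo
          split <;> omega
        omega

theorem pvMem_pvEvents {s im : List (List Int)} {e : Int × Int}
    (h : e ∈ pvEvents s im) :
    0 ≤ e.1 ∧ e.1 < pvNC im ∧ 0 ≤ e.2 ∧ e.2 < pvN s ∧ pvGetVal s e.1 e.2 = 1 := by
  unfold pvEvents at h
  rw [List.mem_flatMap] at h
  obtain ⟨cell, hcell, h2⟩ := h
  rw [List.mem_flatMap] at h2
  obtain ⟨cc, hcc, h3⟩ := h2
  rw [PySem.List.mem_pyRange_one] at hcell hcc
  obtain ⟨he1, he2, he3, he4⟩ := pvMem_pvEv h3 hcell.1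
  refine ⟨?_, ?_, he2, he3, he4⟩ <;> rcases he1 with h | h <;> omega

-- shape of the table is preserved
theorem pvShape_bump (m : List (List Int)) (i j : Int) (h : pvShape m) :
    pvShape (pvBump m i j) := by
  obtain ⟨h7, hrow⟩ := h
  refine ⟨by simp [pvBump, h7], ?_⟩
  intro k hk
  simp only [pvBump, List.length_modify] at hk ⊢
  rw [List.getElem_modify]
  split
  · simp [hrow k hk]
  · exact hrow k hk

theorem pvShape_init : pvShape pvInit := by
  refine ⟨by simp [pvInit], ?_⟩
  intro k hk
  simp only [pvInit, List.getElem_replicate, List.length_replicate]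

-- table entry after one bump
theorem pvEntry_bump (m : List (List Int)) (i j : Int) (a b : Nat) (hm : pvShape m)
    (ha : a < 7) (hb : b < 50) (hi : 0 ≤ i) (hj : 0 ≤ j) (hi7 : i < 7) (hj50 : j < 50) :
    pvEntry (pvBump m i j) a b =
      pvEntry m a b + (if i = (a : Int) ∧ j = (b : Int) then 1 else 0) := by
  obtain ⟨h7, hrow⟩ := hm
  unfold pvEntry pvBump
  have haL : a < m.length := by omega
  have haM : a < (m.modify i.toNat (fun r => r.modify j.toNat (· + 1))).length := by
    rw [List.length_modify]; omega
  rw [List.getD_eq_getElem _ _ haM, List.getD_eq_getElem _ _ haL, List.getElem_modify]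
  have hbR : b < m[a].length := by rw [hrow a haL]; omega
  by_cases hia : i.toNat = a
  · rw [if_pos hia]
    have hbM : b < (m[a].modify j.toNat (· + 1)).length := by rw [List.length_modify]; omega
    rw [List.getD_eq_getElem _ _ hbM, List.getD_eq_getElem _ _ hbR, List.getElem_modify]
    by_cases hjb : j.toNat = b
    · rw [if_pos hjb, if_pos (by omega)]
    · rw [if_neg hjb, if_neg (by omega)]
      omega
  · rw [if_neg hia, if_neg (by omega)]
    omega

theorem pvEntry_apply (evs : List (Int × Int)) (m : List (List Int)) (a b : Nat)
    (hm : pvShape m) (ha : a < 7) (hb : b < 50)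
    (hev : ∀ e ∈ evs, 0 ≤ e.1 ∧ e.1 < 7 ∧ 0 ≤ e.2 ∧ e.2 < 50) :
    pvEntry (pvApply evs m) a b =
      pvEntry m a b + (evs.countP (pvPr (a : Int) (b : Int)) : Int) := by
  induction evs generalizing m with
  | nil => simp [pvApply]
  | cons e t ih =>
      have he := hev e (List.mem_cons_self)
      have step : pvApply (e :: t) m = pvApply t (pvBump m e.1 e.2) := rfl
      rw [step, ih (pvBump m e.1 e.2) (pvShape_bump m e.1 e.2 hm)
            (fun x hx => hev x (List.mem_cons_of_mem _ hx)),
          pvEntry_bump m e.1 e.2 a b hm ha hb he.1 he.2.2.1 he.2.1 he.2.2.2,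
          List.countP_cons]
      have hcast : ∀ (x y : Nat), ((x + y : Nat) : Int) = (x : Int) + (y : Int) := by
        intro x y; push_cast; ring
      rw [hcast]
      have : (if pvPr (↑a) (↑b) e = true then (1:Nat) else 0) =
          (if e.1 = (a : Int) ∧ e.2 = (b : Int) then 1 else 0) := by
        simp [pvPr]
      rw [this]
      split <;> push_cast <;> ring

theorem pvEntry_init (a b : Nat) : pvEntry pvInit a b = 0 := by
  unfold pvEntry pvInit
  have h1 : (List.replicate 7 (List.replicate 50 (0:Int))).getD a [] =
      if a < 7 then List.replicate 50 (0:Int) else [] := by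
    rw [List.getD, List.getElem?_replicate]; split <;> rfl
  rw [h1]
  split
  · rw [List.getD, List.getElem?_replicate]; split <;> rfl
  · rfl

theorem pvSum_ind {α : Type} (l : List α) (p : α → Bool) :
    (l.map (fun x => if p x then (1 : Nat) else 0)).sum = l.countP p := by
  induction l with
  | nil => rfl
  | cons x t ih =>
      rw [List.map_cons, List.sum_cons, List.countP_cons, ih]
      exact Nat.add_comm _ _

-- the per-pair event counts
theorem pvCnt_zero (s im : List (List Int)) (cell cc tc tch : Int)
    (hcell : 0 ≤ cell) (h1 : cell ≠ tc) (h2 : cc ≠ tc) :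
    (pvEv s im cell cc).countP (pvPr tc tch) = 0 := by
  rw [List.countP_eq_zero]
  intro e he hp
  simp only [pvPr, decide_eq_true_eq] at hp
  rcases (pvMem_pvEv he hcell).1 with h | h <;> omega

-- cross pair, cell = tc < cc
theorem pvCnt_cross_right (s im : List (List Int)) (cc tc tch : Int)
    (htc : 0 ≤ tc) (hcc : tc ≠ cc) (htch : 0 ≤ tch) (htchn : tch < pvN s)
    (hs : pvGetVal s tc tch = 1) (hD : pvGetVal im tc cc > 0) :
    (pvEv s im tc cc).countP (pvPr tc tch) =
      (pvOnesRow s (pvN s) cc).countP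
        (fun x => decide (|x - tch| ≤ pvGetVal im tc cc - 1)) := by
  unfold pvEv
  rw [if_pos hD, pvCountP_flatMap]
  set d := pvGetVal im tc cc - 1 with hd
  have hd0 : 0 ≤ d := by omega
  rw [pvSum_point 0 (pvN s) tch _ ?hzero]
  case hzero =>
    intro y hy0 hyn hyt
    split
    · rw [List.countP_eq_zero]
      intro e he hp
      simp only [pvPr, decide_eq_true_eq] at hp
      rcases pvMem_pvEvQ he with h | h
      · rw [h] at hp; simp at hp; omega
      · omega
    · rfl
  rw [if_pos ⟨htch, htchn⟩, if_pos (by simpa using hs)]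
  unfold pvEvQ
  rw [pvCountP_flatMap]
  have hmc : ((PySem.List.pyRange (pvLo tc cc tch d) (min (tch + d + 1) (pvN s)) 1).map
      (fun q => (if pvGetVal s cc q == 1 then [(tc, tch), (cc, q)] else []).countP (pvPr tc tch))) =
    ((PySem.List.pyRange (pvLo tc cc tch d) (min (tch + d + 1) (pvN s)) 1).map
      (fun q => if pvGetVal s cc q == 1 then (1 : Nat) else 0)) := by
    apply List.map_congr_left
    intro q hq
    split
    · rw [List.countP_cons, List.countP_cons, List.countP_nil]
      have h1 : pvPr tc tch (tc, tch) = true := by simp [pvPr]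
      have h2 : pvPr tc tch (cc, q) = false := by
        simp only [pvPr, decide_eq_false_iff_not]
        intro hcp
        exact hcc (hcp.1.symm)
      rw [h1, h2]
      simp
    · rfl
  rw [hmc, pvSum_ind]
  have hlo : pvLo tc cc tch d = max (tch - d) 0 := by
    unfold pvLo
    rw [if_neg (by simpa using hcc)]
  rw [hlo, pvRange_filter (max (tch - d) 0) (min (tch + d + 1) (pvN s)) (pvN s)
      (by omega) (by omega), List.countP_filter]
  unfold pvOnesRow
  rw [List.countP_filter]
  apply List.countP_congr
  intro x hx
  rw [PySem.List.mem_pyRange_one] at hx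
  cases hsv : (pvGetVal s cc x == 1) <;> simp [hsv, abs_le] <;> omega

-- cross pair, cell < cc = tc
theorem pvCnt_cross_left (s im : List (List Int)) (cell tc tch : Int)
    (hcell : cell ≠ tc) (htch : 0 ≤ tch) (htchn : tch < pvN s)
    (hs : pvGetVal s tc tch = 1) (hD : pvGetVal im cell tc > 0) :
    (pvEv s im cell tc).countP (pvPr tc tch) =
      (pvOnesRow s (pvN s) cell).countP
        (fun x => decide (|x - tch| ≤ pvGetVal im cell tc - 1)) := by
  unfold pvEv
  rw [if_pos hD, pvCountP_flatMap]
  set d := pvGetVal im cell tc - 1 with hd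
  have hd0 : 0 ≤ d := by omega
  have hlo : ∀ p : Int, pvLo cell tc p d = max (p - d) 0 := by
    intro p
    unfold pvLo
    rw [if_neg (by simpa using hcell)]
  have hmc : ((PySem.List.pyRange 0 (pvN s) 1).map
      (fun p => (if pvGetVal s cell p == 1 then pvEvQ s cell tc p d (pvN s) else []).countP
        (pvPr tc tch))) =
    ((PySem.List.pyRange 0 (pvN s) 1).map
      (fun p => if (pvGetVal s cell p == 1 && decide (max (p - d) 0 ≤ tch ∧ tch < min (p + d + 1) (pvN s)))
        then (1 : Nat) else 0)) := by
    apply List.map_congr_left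
    intro p hp
    rw [PySem.List.mem_pyRange_one] at hp
    by_cases hsp : pvGetVal s cell p == 1
    · rw [if_pos hsp]
      unfold pvEvQ
      rw [pvCountP_flatMap]
      have hinner : ((PySem.List.pyRange (pvLo cell tc p d) (min (p + d + 1) (pvN s)) 1).map
          (fun q => (if pvGetVal s tc q == 1 then [(cell, p), (tc, q)] else []).countP (pvPr tc tch))) =
        ((PySem.List.pyRange (pvLo cell tc p d) (min (p + d + 1) (pvN s)) 1).map
          (fun q => if pvGetVal s tc q == 1 then (if q = tch then (1 : Nat) else 0) else 0)) := by
        apply List.map_congr_left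
        intro q hq
        split
        · rw [List.countP_cons, List.countP_cons, List.countP_nil]
          have h1 : pvPr tc tch (cell, p) = false := by
            simp only [pvPr, decide_eq_false_iff_not]
            intro hcp
            exact hcell hcp.1
          rw [h1]
          by_cases hqt : q = tch
          · have h2 : pvPr tc tch (tc, q) = true := by simp [pvPr, hqt]
            rw [h2, if_pos hqt]
            simp
          · have h2 : pvPr tc tch (tc, q) = false := by
              simp only [pvPr, decide_eq_false_iff_not]
              intro hcp
              exact hqt hcp.2
            rw [h2, if_neg hqt]
            simp
        · rfl
      rw [hinner]
      have hpm := pvSum_point (pvLo cell tc p d) (min (p + d + 1) (pvN s)) tch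
        (fun q => if pvGetVal s tc q == 1 then (if q = tch then (1 : Nat) else 0) else 0)
        (by intro y _ _ hy
            by_cases hsv : pvGetVal s tc y == 1 <;> simp [hsv, hy])
      rw [hpm, hlo p]
      simp only [hsp, Bool.true_and]
      simp [hs]
    · rw [if_neg hsp, if_neg (by simp [hsp]), List.countP_nil]
  rw [hmc, pvSum_ind]
  unfold pvOnesRow
  rw [List.countP_filter]
  apply List.countP_congr
  intro x hx
  rw [PySem.List.mem_pyRange_one] at hx
  cases hsv : (pvGetVal s cell x == 1) <;> simp [hsv, abs_le] <;> omega

-- diagonal pair, cell = cc = tc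
theorem pvCnt_diag (s im : List (List Int)) (tc tch : Int)
    (htch : 0 ≤ tch) (htchn : tch < pvN s)
    (hs : pvGetVal s tc tch = 1) (hD : pvGetVal im tc tc > 0) :
    (pvEv s im tc tc).countP (pvPr tc tch) =
      (pvOnesRow s (pvN s) tc).countP
        (fun x => decide (x ≠ tch ∧ |x - tch| ≤ pvGetVal im tc tc - 1)) := by
  unfold pvEv
  rw [if_pos hD, pvCountP_flatMap]
  set d := pvGetVal im tc tc - 1 with hd
  have hd0 : 0 ≤ d := by omega
  have hlo : ∀ p : Int, pvLo tc tc p d = p + 1 := by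
    intro p
    simp [pvLo]
  have hsplit : ((PySem.List.pyRange 0 (pvN s) 1).map
      (fun p => (if pvGetVal s tc p == 1 then pvEvQ s tc tc p d (pvN s) else []).countP
        (pvPr tc tch))) =
    ((PySem.List.pyRange 0 (pvN s) 1).map
      (fun p =>
        (if (pvGetVal s tc p == 1 && decide (p = tch)) then
          ((PySem.List.pyRange (tch + 1) (min (tch + d + 1) (pvN s)) 1).countP
            (fun q => pvGetVal s tc q == 1))
        else 0) +
        (if (pvGetVal s tc p == 1 && decide (p + 1 ≤ tch ∧ tch < min (p + d + 1) (pvN s)))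
          then (1 : Nat) else 0))) := by
    apply List.map_congr_left
    intro p hp
    rw [PySem.List.mem_pyRange_one] at hp
    by_cases hsp : pvGetVal s tc p == 1
    · rw [if_pos hsp]
      unfold pvEvQ
      rw [pvCountP_flatMap, hlo p]
      by_cases hpt : p = tch
      · subst hpt
        have hinner : ((PySem.List.pyRange (p + 1) (min (p + d + 1) (pvN s)) 1).map
            (fun q => (if pvGetVal s tc q == 1 then [(tc, p), (tc, q)] else []).countP (pvPr tc p))) =
          ((PySem.List.pyRange (p + 1) (min (p + d + 1) (pvN s)) 1).map
            (fun q => if pvGetVal s tc q == 1 then (1 : Nat) else 0)) := by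
          apply List.map_congr_left
          intro q hq
          rw [PySem.List.mem_pyRange_one] at hq
          split
          · rw [List.countP_cons, List.countP_cons, List.countP_nil]
            have h1 : pvPr tc p (tc, p) = true := by simp [pvPr]
            have h2 : pvPr tc p (tc, q) = false := by
              simp only [pvPr, decide_eq_false_iff_not]
              intro hcp
              omega
            rw [h1, h2]
            simp
          · rfl
        rw [hinner, pvSum_ind]
        rw [if_pos (by simp [hsp]), if_neg (by simp), Nat.add_zero]
      · have hinner : ((PySem.List.pyRange (p + 1) (min (p + d + 1) (pvN s)) 1).map
            (fun q => (if pvGetVal s tc q == 1 then [(tc, p), (tc, q)] else []).countP (pvPr tc tch))) =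
          ((PySem.List.pyRange (p + 1) (min (p + d + 1) (pvN s)) 1).map
            (fun q => if pvGetVal s tc q == 1 then (if q = tch then (1 : Nat) else 0) else 0)) := by
          apply List.map_congr_left
          intro q hq
          split
          · rw [List.countP_cons, List.countP_cons, List.countP_nil]
            have h1 : pvPr tc tch (tc, p) = false := by
              simp only [pvPr, decide_eq_false_iff_not]
              intro hcp
              exact hpt hcp.2
            rw [h1]
            by_cases hqt : q = tch
            · rw [if_pos hqt]
              have h2 : pvPr tc tch (tc, q) = true := by simp [pvPr, hqt]
              rw [h2]
              simp
            · rw [if_neg hqt]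
              have h2 : pvPr tc tch (tc, q) = false := by
                simp only [pvPr, decide_eq_false_iff_not]
                intro hcp
                exact hqt hcp.2
              rw [h2]
              simp
          · rfl
        rw [hinner]
        have hpm := pvSum_point (p + 1) (min (p + d + 1) (pvN s)) tch
          (fun q => if pvGetVal s tc q == 1 then (if q = tch then (1 : Nat) else 0) else 0)
          (by intro y _ _ hy
              by_cases hsv : pvGetVal s tc y == 1 <;> simp [hsv, hy])
        rw [hpm]
        have hA0 : (if (pvGetVal s tc p == 1 && decide (p = tch)) = true then
            ((PySem.List.pyRange (tch + 1) (min (tch + d + 1) (pvN s)) 1).countP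
              (fun q => pvGetVal s tc q == 1)) else 0) = 0 := by simp [hpt]
        rw [hA0, Nat.zero_add]
        simp only [hsp, Bool.true_and]
        simp [hs]
    · rw [if_neg hsp, List.countP_nil]
      simp [hsp]
  rw [hsplit, List.sum_map_add]
  have hA := pvSum_point 0 (pvN s) tch
    (fun p => if (pvGetVal s tc p == 1 && decide (p = tch)) then
        ((PySem.List.pyRange (tch + 1) (min (tch + d + 1) (pvN s)) 1).countP
          (fun q => pvGetVal s tc q == 1))
      else 0)
    (by intro y _ _ hy
        simp [hy])
  rw [hA, if_pos ⟨htch, htchn⟩]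
  have hAt : (fun p => if (pvGetVal s tc p == 1 && decide (p = tch)) = true then
      ((PySem.List.pyRange (tch + 1) (min (tch + d + 1) (pvN s)) 1).countP
        (fun q => pvGetVal s tc q == 1)) else 0) tch =
      ((PySem.List.pyRange (tch + 1) (min (tch + d + 1) (pvN s)) 1).countP
        (fun q => pvGetVal s tc q == 1)) := by simp [hs]
  rw [hAt, pvSum_ind]
  unfold pvOnesRow
  rw [List.countP_filter]
  have hW : (PySem.List.pyRange (tch + 1) (min (tch + d + 1) (pvN s)) 1).countP
      (fun q => pvGetVal s tc q == 1) =
    (PySem.List.pyRange 0 (pvN s) 1).countP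
      (fun x => (pvGetVal s tc x == 1) && decide (tch + 1 ≤ x ∧ x < min (tch + d + 1) (pvN s))) := by
    rw [pvRange_filter (tch + 1) (min (tch + d + 1) (pvN s)) (pvN s) (by omega) (by omega),
      List.countP_filter]
  rw [hW]
  symm
  exact pvCountP_split _ _ _ _
    (by intro x hx
        rw [PySem.List.mem_pyRange_one] at hx
        refine ⟨?_, ?_⟩
        · rw [Bool.eq_iff_iff]
          cases hsv : (pvGetVal s tc x == 1) <;> simp [hsv, abs_le] <;> omega
        · intro hqr
          simp only [Bool.and_eq_true, decide_eq_true_eq] at hqr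
          omega)

-- ones[c] as pvOnesRow
theorem pvOnes_row (s : List (List Int)) (nc n c : Int) (h0 : 0 ≤ c) (h1 : c < nc) :
    PySem.List.pyGetD (pvOnes s nc n) c [] = pvOnesRow s n c := by
  unfold pvOnes pvOnesRow
  rw [PySem.List.pyGetD_map_pyRange_of_nonneg _ _ _ _ h0 h1]

-- B's per-cell contribution to the cost of (tc, tch), as a Nat
def pvG (s im : List (List Int)) (tc tch c1 : Int) : Nat :=
  if pvGetVal im (min tc c1) (max tc c1) > 0 then
    (if c1 = tc then
      (pvOnesRow s (pvN s) tc).countP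
        (fun x => decide (x ≠ tch ∧ |x - tch| ≤ pvGetVal im tc tc - 1))
    else
      (pvOnesRow s (pvN s) c1).countP
        (fun x => decide (|x - tch| ≤ pvGetVal im (min tc c1) (max tc c1) - 1)))
  else 0

-- one pair's event count is pvG, in the three configurations
theorem pvPair_lt (s im : List (List Int)) (tc tch cell : Int)
    (hc0 : 0 ≤ cell) (hclt : cell < tc) (htch : 0 ≤ tch) (htchn : tch < pvN s)
    (hs : pvGetVal s tc tch = 1) :
    (pvEv s im cell tc).countP (pvPr tc tch) = pvG s im tc tch cell := by
  have hmin : min tc cell = cell := min_eq_right (by omega)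
  have hmax : max tc cell = tc := max_eq_left (by omega)
  unfold pvG
  rw [hmin, hmax]
  by_cases hD : pvGetVal im cell tc > 0
  · rw [if_pos hD, if_neg (show ¬cell = tc by omega)]
    exact pvCnt_cross_left s im cell tc tch (by omega) htch htchn hs hD
  · rw [if_neg hD]
    unfold pvEv
    rw [if_neg hD, List.countP_nil]

theorem pvPair_gt (s im : List (List Int)) (tc tch cc : Int)
    (hcgt : tc < cc) (htc : 0 ≤ tc) (htch : 0 ≤ tch) (htchn : tch < pvN s)
    (hs : pvGetVal s tc tch = 1) :
    (pvEv s im tc cc).countP (pvPr tc tch) = pvG s im tc tch cc := by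
  have hmin : min tc cc = tc := min_eq_left (by omega)
  have hmax : max tc cc = cc := max_eq_right (by omega)
  unfold pvG
  rw [hmin, hmax]
  by_cases hD : pvGetVal im tc cc > 0
  · rw [if_pos hD, if_neg (show ¬cc = tc by omega)]
    exact pvCnt_cross_right s im cc tc tch htc (by omega) htch htchn hs hD
  · rw [if_neg hD]
    unfold pvEv
    rw [if_neg hD, List.countP_nil]

theorem pvPair_diag (s im : List (List Int)) (tc tch : Int)
    (htch : 0 ≤ tch) (htchn : tch < pvN s) (hs : pvGetVal s tc tch = 1) :
    (pvEv s im tc tc).countP (pvPr tc tch) = pvG s im tc tch tc := by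
  unfold pvG
  rw [min_self, max_self]
  by_cases hD : pvGetVal im tc tc > 0
  · rw [if_pos hD, if_pos rfl]
    exact pvCnt_diag s im tc tch htch htchn hs hD
  · rw [if_neg hD]
    unfold pvEv
    rw [if_neg hD, List.countP_nil]

-- the total event count at an in-grid target is B's cost
theorem pvCount_main (s im : List (List Int)) (tc tch : Int)
    (htc0 : 0 ≤ tc) (htc : tc < pvNC im) (htch0 : 0 ≤ tch) (htch : tch < pvN s) :
    ((pvEvents s im).countP (pvPr tc tch) : Int) =
      pvCostB s im (pvOnes s (pvNC im) (pvN s)) (pvNC im) tc tch := by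
  by_cases hs : pvGetVal s tc tch = 1
  case neg =>
    have hz : (pvEvents s im).countP (pvPr tc tch) = 0 := by
      rw [List.countP_eq_zero]
      intro e he hp
      simp only [pvPr, decide_eq_true_eq] at hp
      have h5 := (pvMem_pvEvents he).2.2.2.2
      rw [hp.1, hp.2] at h5
      exact hs h5
    rw [hz]
    unfold pvCostB
    rw [if_pos hs]
    rfl
  case pos =>
    -- the LHS as a sum over cells of sums over pair partners
    unfold pvEvents
    rw [pvCountP_flatMap]
    have hmapF : ((PySem.List.pyRange 0 (pvNC im) 1).map
        (fun cell => ((PySem.List.pyRange cell (pvNC im) 1).flatMap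
          (fun cc => pvEv s im cell cc)).countP (pvPr tc tch))) =
      ((PySem.List.pyRange 0 (pvNC im) 1).map
        (fun cell => (((PySem.List.pyRange cell (pvNC im) 1).map
          (fun cc => (pvEv s im cell cc).countP (pvPr tc tch))).sum))) := by
      apply List.map_congr_left
      intro cell _
      rw [pvCountP_flatMap]
    rw [hmapF]
    -- split the cell range at tc
    rw [PySem.List.pyRange_one_append 0 tc (pvNC im) htc0 (by omega),
        PySem.List.pyRange_one_cons (show tc < pvNC im from htc),
        List.map_append, List.map_cons, List.sum_append, List.sum_cons]
    -- cells below tc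
    have hpiece1 : ((PySem.List.pyRange 0 tc 1).map
        (fun cell => (((PySem.List.pyRange cell (pvNC im) 1).map
          (fun cc => (pvEv s im cell cc).countP (pvPr tc tch))).sum))) =
      ((PySem.List.pyRange 0 tc 1).map (fun cell => pvG s im tc tch cell)) := by
      apply List.map_congr_left
      intro cell hcell
      rw [PySem.List.mem_pyRange_one] at hcell
      rw [pvSum_point cell (pvNC im) tc _ ?hz1, if_pos ⟨by omega, htc⟩]
      · exact pvPair_lt s im tc tch cell hcell.1 hcell.2 htch0 htch hs
      case hz1 =>
        intro y _ _ hy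
        exact pvCnt_zero s im cell y tc tch hcell.1 (by omega) hy
    -- the diagonal cell
    have hpiece2 : (((PySem.List.pyRange tc (pvNC im) 1).map
        (fun cc => (pvEv s im tc cc).countP (pvPr tc tch))).sum) =
      pvG s im tc tch tc +
        ((PySem.List.pyRange (tc + 1) (pvNC im) 1).map (fun cc => pvG s im tc tch cc)).sum := by
      rw [PySem.List.pyRange_one_cons (show tc < pvNC im from htc), List.map_cons, List.sum_cons]
      congr 1
      · exact pvPair_diag s im tc tch htch0 htch hs
      · apply congrArg
        apply List.map_congr_left
        intro cc hcc
        rw [PySem.List.mem_pyRange_one] at hcc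
        exact pvPair_gt s im tc tch cc (by omega) htc0 htch0 htch hs
    -- cells above tc
    have hpiece3 : ((PySem.List.pyRange (tc + 1) (pvNC im) 1).map
        (fun cell => (((PySem.List.pyRange cell (pvNC im) 1).map
          (fun cc => (pvEv s im cell cc).countP (pvPr tc tch))).sum))) =
      ((PySem.List.pyRange (tc + 1) (pvNC im) 1).map (fun _ => (0 : Nat))) := by
      apply List.map_congr_left
      intro cell hcell
      rw [PySem.List.mem_pyRange_one] at hcell
      apply List.sum_eq_zero
      intro x hx
      obtain ⟨cc, hcc, rfl⟩ := List.mem_map.mp hx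
      rw [PySem.List.mem_pyRange_one] at hcc
      exact pvCnt_zero s im cell cc tc tch (by omega) (by omega) (by omega)
    rw [hpiece1, hpiece2, hpiece3]
    -- the RHS as the same sum
    unfold pvCostB
    rw [if_neg (by simp [hs])]
    have hbody : (PySem.List.pyRange 0 (pvNC im) 1).foldl (fun total c1 =>
        let D := pvGetVal im (min tc c1) (max tc c1)
        if D > 0 then
          if c1 == tc then
            total + ((PySem.List.pyGetD (pvOnes s (pvNC im) (pvN s)) c1 []).countP
              (fun x => decide (x ≠ tch ∧ |x - tch| ≤ D - 1)) : Int)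
          else
            total + ((PySem.List.pyGetD (pvOnes s (pvNC im) (pvN s)) c1 []).countP
              (fun x => decide (|x - tch| ≤ D - 1)) : Int)
        else total) 0 =
      (PySem.List.pyRange 0 (pvNC im) 1).foldl (fun total c1 =>
        total + (pvG s im tc tch c1 : Int)) 0 := by
      apply PySem.List.foldl_congr_mem
      intro acc c1 hc1
      rw [PySem.List.mem_pyRange_one] at hc1
      dsimp only
      unfold pvG
      by_cases hD : pvGetVal im (min tc c1) (max tc c1) > 0
      · rw [if_pos hD, if_pos hD]
        by_cases hct : c1 = tc
        · rw [if_pos (by simp [hct]), if_pos hct]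
          subst hct
          rw [pvOnes_row s (pvNC im) (pvN s) c1 (by omega) (by omega), min_self, max_self]
        · rw [if_neg (by simp [hct]), if_neg hct]
          rw [pvOnes_row s (pvNC im) (pvN s) c1 (by omega) (by omega)]
      · rw [if_neg hD, if_neg hD]
        omega
    rw [hbody, PySem.List.foldl_add]
    rw [PySem.List.pyRange_one_append 0 tc (pvNC im) htc0 (by omega),
        PySem.List.pyRange_one_cons (show tc < pvNC im from htc),
        List.map_append, List.map_cons, List.sum_append, List.sum_cons]
    push_cast
    simp only [List.map_map]
    simp only [Function.comp_def, Nat.cast_zero]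
    simp only [List.map_const', List.sum_replicate, smul_zero]
    omega

-- the event count vanishes off the grid
theorem pvCount_out (s im : List (List Int)) (tc tch : Int)
    (h : ¬(0 ≤ tc ∧ tc < pvNC im ∧ 0 ≤ tch ∧ tch < pvN s)) :
    (pvEvents s im).countP (pvPr tc tch) = 0 := by
  rw [List.countP_eq_zero]
  intro e he hp
  obtain ⟨h1, h2, h3, h4, _⟩ := pvMem_pvEvents he
  simp only [pvPr, decide_eq_true_eq] at hp
  obtain ⟨hp1, hp2⟩ := hp
  exact h ⟨by omega, by omega, by omega, by omega⟩

-- B's cost is nonnegative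
theorem pvCostB_nonneg (s im ones : List (List Int)) (nc c0 ch0 : Int) :
    0 ≤ pvCostB s im ones nc c0 ch0 := by
  unfold pvCostB
  split
  · exact le_refl 0
  · apply pvFoldl_pres (fun t : Int => 0 ≤ t)
    · intro acc x hacc
      dsimp only
      split
      · split
        · have := Int.natCast_nonneg ((PySem.List.pyGetD ones x []).countP
            (fun y => decide (y ≠ ch0 ∧ |y - ch0| ≤ pvGetVal im (min c0 x) (max c0 x) - 1)))
          omega
        · have := Int.natCast_nonneg ((PySem.List.pyGetD ones x []).countP
            (fun y => decide (|y - ch0| ≤ pvGetVal im (min c0 x) (max c0 x) - 1)))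
          omega
      · exact hacc
    · exact le_refl 0

-- the argmax over the 7×50 grid of the zero-extended value function equals the
-- argmax over the num_cells × num_channels grid of the value function
theorem pvScan_restrict (v : Int → Int → Int) (nc n : Int)
    (hnc0 : 0 ≤ nc) (hnc : nc ≤ 7) (hn0 : 0 ≤ n) (hn : n ≤ 50)
    (hpos : ∀ c ch, 0 ≤ v c ch) :
    (PySem.List.pyRange 0 7 1).foldl (fun st c =>
      (PySem.List.pyRange 0 50 1).foldl (fun (st : Int × Int × Int) ch =>
        if (if c < nc ∧ ch < n then v c ch else 0) > st.1 then
          ((if c < nc ∧ ch < n then v c ch else 0), c, ch)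
        else st) st) ((0 : Int), (0 : Int), (0 : Int)) =
    (PySem.List.pyRange 0 nc 1).foldl (fun st c =>
      (PySem.List.pyRange 0 n 1).foldl (fun (st : Int × Int × Int) ch =>
        if v c ch > st.1 then (v c ch, c, ch) else st) st) ((0 : Int), (0 : Int), (0 : Int)) := by
  -- each step of either scan keeps the running maximum nonnegative
  have hpresA : ∀ (st : Int × Int × Int) (c ch : Int),
      0 ≤ st.1 → 0 ≤ (if (if c < nc ∧ ch < n then v c ch else 0) > st.1 then
        ((if c < nc ∧ ch < n then v c ch else 0), c, ch) else st).1 := by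
    intro st c ch hst
    by_cases hcc : (if c < nc ∧ ch < n then v c ch else 0) > st.1
    · rw [if_pos hcc]
      by_cases hw : c < nc ∧ ch < n
      · rw [if_pos hw]
        exact hpos c ch
      · rw [if_neg hw]
    · rw [if_neg hcc]
      exact hst
  have hpresB : ∀ (st : Int × Int × Int) (c ch : Int),
      0 ≤ st.1 → 0 ≤ (if v c ch > st.1 then (v c ch, c, ch) else st).1 := by
    intro st c ch hst
    split
    · exact hpos c ch
    · exact hst
  -- a row whose cell index is out of range changes nothing
  have htail : ∀ (c : Int) (st : Int × Int × Int), 0 ≤ st.1 → ¬c < nc →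
      (PySem.List.pyRange 0 50 1).foldl (fun st ch =>
        if (if c < nc ∧ ch < n then v c ch else 0) > st.1 then
          ((if c < nc ∧ ch < n then v c ch else 0), c, ch)
        else st) st = st := by
    intro c st hst hcn
    apply pvFoldl_fix (fun st : Int × Int × Int => 0 ≤ st.1) _ _ _ hst
    intro st ch _ hst'
    rw [if_neg (show ¬(c < nc ∧ ch < n) from fun hcc => hcn hcc.1),
        if_neg (show ¬((0 : Int) > st.1) by omega)]
  -- a row in range: the trailing channels change nothing, the rest agree with B's row
  have hrow : ∀ (c : Int) (st : Int × Int × Int), 0 ≤ st.1 → c < nc →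
      (PySem.List.pyRange 0 50 1).foldl (fun st ch =>
        if (if c < nc ∧ ch < n then v c ch else 0) > st.1 then
          ((if c < nc ∧ ch < n then v c ch else 0), c, ch)
        else st) st =
      (PySem.List.pyRange 0 n 1).foldl (fun st ch =>
        if v c ch > st.1 then (v c ch, c, ch) else st) st := by
    intro c st hst hcn
    rw [PySem.List.pyRange_one_append 0 n 50 hn0 hn, List.foldl_append]
    have hfirst : (PySem.List.pyRange 0 n 1).foldl (fun st ch =>
        if (if c < nc ∧ ch < n then v c ch else 0) > st.1 then
          ((if c < nc ∧ ch < n then v c ch else 0), c, ch)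
        else st) st =
      (PySem.List.pyRange 0 n 1).foldl (fun st ch =>
        if v c ch > st.1 then (v c ch, c, ch) else st) st := by
      apply PySem.List.foldl_congr_mem
      intro acc ch hch
      rw [PySem.List.mem_pyRange_one] at hch
      rw [if_pos (show c < nc ∧ ch < n from ⟨hcn, hch.2⟩)]
    rw [hfirst]
    apply pvFoldl_fix (fun st : Int × Int × Int => 0 ≤ st.1)
    · exact pvFoldl_pres _ _ _ _ (fun acc ch hacc => hpresB acc c ch hacc) hst
    · intro st' ch hch hst'
      rw [PySem.List.mem_pyRange_one] at hch
      rw [if_neg (show ¬(c < nc ∧ ch < n) by omega),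
          if_neg (show ¬((0 : Int) > st'.1) by omega)]
  -- assemble: split the 7 rows at nc
  rw [PySem.List.pyRange_one_append 0 nc 7 hnc0 hnc, List.foldl_append]
  have hmain : ∀ (l : List Int) (st : Int × Int × Int), (∀ c ∈ l, c < nc) → 0 ≤ st.1 →
      l.foldl (fun st c => (PySem.List.pyRange 0 50 1).foldl (fun st ch =>
        if (if c < nc ∧ ch < n then v c ch else 0) > st.1 then
          ((if c < nc ∧ ch < n then v c ch else 0), c, ch)
        else st) st) st =
      l.foldl (fun st c => (PySem.List.pyRange 0 n 1).foldl (fun st ch =>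
        if v c ch > st.1 then (v c ch, c, ch) else st) st) st := by
    intro l
    induction l with
    | nil => intro st _ _; rfl
    | cons c t ih =>
        intro st hl hst
        rw [List.foldl_cons, List.foldl_cons, hrow c st hst (hl c (List.mem_cons_self))]
        exact ih _ (fun x hx => hl x (List.mem_cons_of_mem _ hx))
          (pvFoldl_pres _ _ _ _ (fun acc ch hacc => hpresB acc c ch hacc) hst)
  rw [hmain (PySem.List.pyRange 0 nc 1) _ (fun x hx => (PySem.List.mem_pyRange_one.mp hx).2)
      (le_refl 0)]
  apply pvFoldl_fix (fun st : Int × Int × Int => 0 ≤ st.1)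
  · apply pvFoldl_pres (fun st : Int × Int × Int => 0 ≤ st.1)
    · intro acc c hacc
      exact pvFoldl_pres _ _ _ _ (fun a ch ha => hpresB a c ch ha) hacc
    · exact le_refl 0
  · intro st c hc hst
    rw [PySem.List.mem_pyRange_one] at hc
    exact htail c st hst (by omega)

-- value of A's table at the scan's indices
theorem pvTable_value (s im : List (List Int)) (c ch : Int)
    (hpre : Pre_find_most_conflicts s im)
    (hc : 0 ≤ c ∧ c < 7) (hch : 0 ≤ ch ∧ ch < 50) :
    pvGetVal (pvCostsA s im) c ch =
      if c < pvNC im ∧ ch < pvN s then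
        pvCostB s im (pvOnes s (pvNC im) (pvN s)) (pvNC im) c ch
      else 0 := by
  obtain ⟨hne, hlen, hnc7, hn50, hrows, hsrows⟩ := hpre
  have hgh : (PySem.List.pyGetD s 0 ([] : List Int)) = s.headD [] := by
    rw [PySem.List.pyGetD_zero]
    cases s <;> simp
  have hn50' : pvN s ≤ 50 := by
    unfold pvN
    rw [hgh]
    exact_mod_cast hn50
  have hnc7' : pvNC im ≤ 7 := by
    unfold pvNC
    exact_mod_cast hnc7
  have hev : ∀ e ∈ pvEvents s im, 0 ≤ e.1 ∧ e.1 < 7 ∧ 0 ≤ e.2 ∧ e.2 < 50 := by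
    intro e he
    obtain ⟨h1, h2, h3, h4, _⟩ := pvMem_pvEvents he
    exact ⟨h1, by omega, h3, by omega⟩
  rw [pvCostsA_events]
  have h1 : pvGetVal (pvApply (pvEvents s im) pvInit) c ch =
      pvEntry (pvApply (pvEvents s im) pvInit) c.toNat ch.toNat := by
    unfold pvGetVal pvEntry
    rw [PySem.List.pyGetD_of_nonneg _ _ hc.1, PySem.List.pyGetD_of_nonneg _ _ hch.1]
  rw [h1, pvEntry_apply (pvEvents s im) pvInit c.toNat ch.toNat pvShape_init
      (by omega) (by omega) hev, pvEntry_init, zero_add]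
  have hcast1 : ((c.toNat : Nat) : Int) = c := Int.toNat_of_nonneg hc.1
  have hcast2 : ((ch.toNat : Nat) : Int) = ch := Int.toNat_of_nonneg hch.1
  rw [hcast1, hcast2]
  by_cases hin : c < pvNC im ∧ ch < pvN s
  · rw [if_pos hin]
    exact pvCount_main s im c ch hc.1 hin.1 hch.1 hin.2
  · rw [if_neg hin, pvCount_out s im c ch (by
      intro hcon
      exact hin ⟨hcon.2.1, hcon.2.2.2⟩)]
    simp

-- ===== VERDICT (by name: the statement is the Claim_ definition above) =====
theorem find_most_conflicts_spec : Claim_equal_find_most_conflicts := by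
  intro s im _ hpre
  unfold Spec_find_most_conflicts find_most_conflicts find_most_conflicts_alt pvScanA
  obtain ⟨hne, hlen, hnc7, hn50, hrows, hsrows⟩ := hpre
  have hgh : (PySem.List.pyGetD s 0 ([] : List Int)) = s.headD [] := by
    rw [PySem.List.pyGetD_zero]
    cases s <;> simp
  have hn50' : pvN s ≤ 50 := by
    unfold pvN
    rw [hgh]
    exact_mod_cast hn50
  have hnc7' : pvNC im ≤ 7 := by
    unfold pvNC
    exact_mod_cast hnc7
  have hnc0 : (0 : Int) ≤ pvNC im := Int.natCast_nonneg _
  have hn0 : (0 : Int) ≤ pvN s := Int.natCast_nonneg _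
  have hstep : (PySem.List.pyRange 0 7 1).foldl (fun st cell =>
      (PySem.List.pyRange 0 50 1).foldl (fun (st : Int × Int × Int) channel =>
        if pvGetVal (pvCostsA s im) cell channel > st.1 then
          (pvGetVal (pvCostsA s im) cell channel, cell, channel)
        else st) st) ((0 : Int), (0 : Int), (0 : Int)) =
    (PySem.List.pyRange 0 7 1).foldl (fun st c =>
      (PySem.List.pyRange 0 50 1).foldl (fun (st : Int × Int × Int) ch =>
        if (if c < pvNC im ∧ ch < pvN s then
              pvCostB s im (pvOnes s (pvNC im) (pvN s)) (pvNC im) c ch else 0) > st.1 then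
          ((if c < pvNC im ∧ ch < pvN s then
              pvCostB s im (pvOnes s (pvNC im) (pvN s)) (pvNC im) c ch else 0), c, ch)
        else st) st) ((0 : Int), (0 : Int), (0 : Int)) := by
    apply PySem.List.foldl_congr_mem
    intro st c hc
    apply PySem.List.foldl_congr_mem
    intro st2 ch hch
    rw [PySem.List.mem_pyRange_one] at hc hch
    rw [pvTable_value s im c ch ⟨hne, hlen, hnc7, hn50, hrows, hsrows⟩
      ⟨hc.1, hc.2⟩ ⟨hch.1, hch.2⟩]
  rw [hstep, pvScan_restrict (pvCostB s im (pvOnes s (pvNC im) (pvN s)) (pvNC im))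
    (pvNC im) (pvN s) hnc0 hnc7' hn0 hn50'
    (fun c ch => pvCostB_nonneg s im (pvOnes s (pvNC im) (pvN s)) (pvNC im) c ch)]
  rfl
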